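-- pv_equiv track=rewrite | github.com/COkedat/Code_Practice | 11170.py | getZeroCnt
-- ===== SOURCE A (Python) =====
-- def getZeroCnt(a, b):
--     zero=0
--     for i in range(a,b+1):
--         quest = list(str(i))
--         for j in quest:
--             if (j=='0'):
--                 zero+=1
--     return zero
-- ===== SOURCE B (Python) =====
-- def getZeroCnt(a, b):
--     # Digit-DP: Z(n) = total zero digits in the decimal forms of 1..n, via a
--     # log-depth recursion; the answer over [a,b] is taken as prefix differences,
--     # splitting off negatives (zeros of str(i) for i<0 = zeros of str(-i)) and 0 itself.
--     def z(n):  # zero digits of n (n >= 1); z(0) == 0 by this loop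
--         c = 0
--         while n > 0:
--             if n % 10 == 0:
--                 c += 1
--             n //= 10
--         return c
--
--     def Z(n):  # sum of z(k) for k = 1..n
--         if n <= 0:
--             return 0
--         m = n // 10
--         return m + 10 * Z(m - 1) + (n % 10 + 1) * z(m)
--
--     total = 1 if a <= 0 <= b else 0
--     lo = max(a, 1)
--     if lo <= b:
--         total += Z(b) - Z(lo - 1)
--     lo2 = max(-b, 1)
--     if lo2 <= -a:
--         total += Z(-a) - Z(lo2 - 1)
--     return total
-- ===== Notes on version B (the rewrite author's own statement) =====
-- stated objective: faster
-- what changed: Replaced the per-number string scan over the whole range with a logarithmic digit-DP prefix sum Z(n) of zero-digit counts, answering by prefix differences (negatives folded to |i|).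
import Mathlib
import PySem

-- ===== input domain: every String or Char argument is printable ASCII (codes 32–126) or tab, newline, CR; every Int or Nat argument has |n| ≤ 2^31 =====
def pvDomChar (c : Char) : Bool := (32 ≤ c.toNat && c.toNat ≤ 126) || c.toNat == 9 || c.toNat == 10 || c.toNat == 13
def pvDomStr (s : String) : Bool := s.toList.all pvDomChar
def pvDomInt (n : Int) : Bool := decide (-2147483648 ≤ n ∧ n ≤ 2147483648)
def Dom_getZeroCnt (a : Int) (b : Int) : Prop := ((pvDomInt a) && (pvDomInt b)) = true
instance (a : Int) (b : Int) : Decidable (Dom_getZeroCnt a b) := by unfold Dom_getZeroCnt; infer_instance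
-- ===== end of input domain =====

-- B replaces A's per-number string scan over the whole range by a digit-DP prefix sum of
-- zero-digit counts taken as prefix differences (objective: faster).

-- ===== PORT A =====
-- for i in range(a, b+1): for j in list(str(i)): if j == '0': zero += 1
def getZeroCnt (a : Int) (b : Int) : Int :=
  (PySem.List.pyRange a (b + 1) 1).foldl
    (fun zero i =>
      (PySem.Int.toStr i).toList.foldl (fun z j => if j = '0' then z + 1 else z) zero)
    0

-- ===== PORT B =====
-- z(n) of Source B: zero digits of n via the `while n > 0: … n //= 10` loop (z(n) = 0 for n ≤ 0)
def zAlt (n : Int) : Int :=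
  if _h : n ≤ 0 then 0
  else (if PySem.Int.mod n 10 = 0 then 1 else 0) + zAlt (PySem.Int.floordiv n 10)
termination_by n.toNat
decreasing_by
  rw [PySem.Int.floordiv_eq_ediv_of_pos (by omega : (0:Int) < 10)]
  omega

-- Z(n) of Source B: sum of z(k) for k = 1..n by the log-depth recursion
def ZAlt (n : Int) : Int :=
  if _h : n ≤ 0 then 0
  else
    let m := PySem.Int.floordiv n 10
    m + 10 * ZAlt (m - 1) + (PySem.Int.mod n 10 + 1) * zAlt m
termination_by n.toNat
decreasing_by
  rw [PySem.Int.floordiv_eq_ediv_of_pos (by omega : (0:Int) < 10)]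
  omega

def getZeroCnt_alt (a : Int) (b : Int) : Int :=
  let total0 := if a ≤ 0 ∧ 0 ≤ b then (1 : Int) else 0
  let lo := max a 1
  let total1 := if lo ≤ b then total0 + (ZAlt b - ZAlt (lo - 1)) else total0
  let lo2 := max (-b) 1
  if lo2 ≤ -a then total1 + (ZAlt (-a) - ZAlt (lo2 - 1)) else total1

-- ===== PRECONDITION & SPEC =====
def Spec_getZeroCnt (a : Int) (b : Int) (out : Int) : Prop := out = getZeroCnt_alt a b
instance (a : Int) (b : Int) (out : Int) : Decidable (Spec_getZeroCnt a b out) := by unfold Spec_getZeroCnt; infer_instance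

-- ===== CLAIM (what is proved, stated in full; the proofs are below) =====
def Claim_equal_getZeroCnt : Prop := ∀ (a : Int) (b : Int), Dom_getZeroCnt a b → Spec_getZeroCnt a b (getZeroCnt a b)

-- ===== LEMMAS AND PROOFS =====

-- number of '0' characters in str(i), as an Int
def cnt (i : Int) : Int := ((PySem.Int.toChars i).countP (fun j => j = '0') : Int)

theorem zAlt_nonpos {n : Int} (h : n ≤ 0) : zAlt n = 0 := by
  unfold zAlt; simp [h]

theorem zAlt_pos {n : Int} (h : 0 < n) :
    zAlt n = (if n % 10 = 0 then 1 else 0) + zAlt (n / 10) := by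
  rw [zAlt]
  rw [PySem.Int.mod_eq_emod_of_pos (by omega : (0:Int) < 10),
      PySem.Int.floordiv_eq_ediv_of_pos (by omega : (0:Int) < 10)]
  simp [not_le.mpr h]

theorem ZAlt_nonpos {n : Int} (h : n ≤ 0) : ZAlt n = 0 := by
  unfold ZAlt; simp [h]

theorem ZAlt_pos {n : Int} (h : 0 < n) :
    ZAlt n = n / 10 + 10 * ZAlt (n / 10 - 1) + (n % 10 + 1) * zAlt (n / 10) := by
  rw [ZAlt]
  rw [PySem.Int.mod_eq_emod_of_pos (by omega : (0:Int) < 10),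
      PySem.Int.floordiv_eq_ediv_of_pos (by omega : (0:Int) < 10)]
  simp [show ¬ n ≤ 0 by omega]

theorem zAlt_zero : zAlt 0 = 0 := zAlt_nonpos (le_refl 0)

theorem zAlt_one : zAlt (1:Int) = 0 := by
  rw [zAlt_pos one_pos]; norm_num [zAlt_nonpos]

-- the key recurrence of the digit DP: Z n = Z (n-1) + z n for n ≥ 1
theorem ZAlt_step_aux : ∀ (k : Nat) (n : Int), n.toNat = k → 1 ≤ n → ZAlt n = ZAlt (n - 1) + zAlt n := by
  intro k
  induction k using Nat.strong_induction_on with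
  | _ k ih =>
    intro n hk hn
    have e1 := ZAlt_pos (show (0:Int) < n by omega)
    have e3 := zAlt_pos (show (0:Int) < n by omega)
    by_cases hsm : n ≤ 9
    · have hm : n / 10 = 0 := by omega
      have hr : n % 10 = n := by omega
      rw [hm, zAlt_zero, ZAlt_nonpos (show ((0:Int) - 1) ≤ 0 by norm_num)] at e1
      rw [hm, zAlt_zero] at e3
      have e2 : ZAlt (n - 1) = 0 := by
        rcases eq_or_lt_of_le hn with h1 | h1
        · rw [← h1]; exact ZAlt_nonpos (by norm_num)
        · have e2' := ZAlt_pos (show (0:Int) < n - 1 by omega)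
          have hm2 : (n - 1) / 10 = 0 := by omega
          rw [hm2, zAlt_zero, ZAlt_nonpos (show ((0:Int) - 1) ≤ 0 by norm_num)] at e2'
          rw [e2']; ring
      rw [if_neg (show ¬ n % 10 = 0 by omega)] at e3
      rw [e1, e2, e3]; ring
    · have h10 : 10 ≤ n := by omega
      have hM1 : 1 ≤ n / 10 := by omega
      have e2 := ZAlt_pos (show (0:Int) < n - 1 by omega)
      by_cases hz : n % 10 = 0
      · have hdiv : (n - 1) / 10 = n / 10 - 1 := by omega
        have hmod : (n - 1) % 10 = 9 := by omega
        rw [hdiv, hmod] at e2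
        rw [hz] at e1
        rw [if_pos hz] at e3
        by_cases hM : n / 10 = 1
        · rw [hM] at e1 e2 e3
          rw [zAlt_one] at e1 e3
          rw [ZAlt_nonpos (show ((1:Int) - 1) ≤ 0 by norm_num)] at e1
          rw [ZAlt_nonpos (show ((1:Int) - 1 - 1) ≤ 0 by norm_num),
              zAlt_nonpos (show ((1:Int) - 1) ≤ 0 by norm_num)] at e2
          rw [e1, e2, e3]; ring
        · have hM2 : 2 ≤ n / 10 := by omega
          have e4 := ih (n / 10 - 1).toNat (by omega) (n / 10 - 1) rfl (by omega)
          rw [show n / 10 - 1 - 1 = n / 10 - 2 by ring] at e2 e4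
          linear_combination e1 - e2 - e3 + 10 * e4
      · have hdiv : (n - 1) / 10 = n / 10 := by omega
        have hmod : (n - 1) % 10 = n % 10 - 1 := by omega
        rw [hdiv, hmod] at e2
        rw [if_neg hz] at e3
        linear_combination e1 - e2 - e3

theorem ZAlt_step (n : Int) (hn : 1 ≤ n) : ZAlt n = ZAlt (n - 1) + zAlt n :=
  ZAlt_step_aux n.toNat n rfl hn

-- counting '0' characters produced by Nat.toDigitsCore, with enough fuel
theorem toDigitsCore_count (fuel : Nat) :
    ∀ (n : Nat) (ds : List Char), n < fuel →
      (((Nat.toDigitsCore 10 fuel n ds).countP (fun j => j = '0') : Int))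
        = (if n = 0 then 1 else zAlt (n : Int)) + (ds.countP (fun j => j = '0') : Int) := by
  induction fuel with
  | zero => intro n ds h; omega
  | succ f ih =>
    intro n ds h
    rw [Nat.toDigitsCore]
    have hd : (Nat.digitChar (n % 10) = '0') ↔ (n % 10 = 0) := by
      have : n % 10 < 10 := Nat.mod_lt _ (by omega)
      interval_cases h' : n % 10 <;> simp [Nat.digitChar]
    by_cases h0 : n / 10 = 0
    · rw [h0, if_pos rfl]
      rcases Nat.eq_zero_or_pos n with hn | hn
      · subst hn; simp [Nat.digitChar]; omega
      · have hne : n ≠ 0 := by omega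
        have hlt : n < 10 := by omega
        rw [zAlt_pos (by exact_mod_cast hn)]
        simp only [List.countP_cons]
        have hz : zAlt ((n : Int) / 10) = 0 := by
          apply zAlt_nonpos; omega
        rw [hz]
        by_cases hc : Nat.digitChar (n % 10) = '0'
        · have : n % 10 = 0 := hd.mp hc
          omega
        · have h1 : ¬ n % 10 = 0 := fun hh => hc (hd.mpr hh)
          have h2 : (n : Int) % 10 ≠ 0 := by omega
          simp [hc, h2, hne]
    · rw [if_neg h0]
      have hlt : n / 10 < f := by
        have : n / 10 < n := Nat.div_lt_self (by omega) (by omega)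
        omega
      rw [ih (n / 10) _ hlt]
      have hne : n ≠ 0 := by
        intro hh; subst hh; simp at h0
      rw [zAlt_pos (by exact_mod_cast Nat.pos_of_ne_zero hne : (0:Int) < (n : Int))]
      have hdiv : ((n : Int)) / 10 = ((n / 10 : Nat) : Int) := by
        exact_mod_cast (Int.natCast_div n 10).symm
      rw [hdiv]
      simp only [if_neg h0, List.countP_cons]
      by_cases hc : Nat.digitChar (n % 10) = '0'
      · have h1 : n % 10 = 0 := hd.mp hc
        have h2 : (n : Int) % 10 = 0 := by omega
        simp [hc, h2, hne]
        ring
      · have h1 : ¬ n % 10 = 0 := fun hh => hc (hd.mpr hh)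
        have h2 : ¬ (n : Int) % 10 = 0 := by omega
        simp [hc, h2, hne]

theorem count_toDigits (n : Nat) :
    ((Nat.toDigits 10 n).countP (fun j => j = '0') : Int)
      = if n = 0 then 1 else zAlt (n : Int) := by
  have := toDigitsCore_count (n + 1) n [] (by omega)
  simpa [Nat.toDigits] using this

theorem cnt_eq (i : Int) :
    cnt i = if i = 0 then 1 else zAlt (if 0 < i then i else -i) := by
  unfold cnt PySem.Int.toChars
  by_cases hneg : i < 0
  · simp only [if_pos hneg, List.countP_cons]
    have h0 : ¬ i = 0 := by omega
    have h1 : ¬ 0 < i := by omega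
    have hcast : (i.natAbs : Int) = -i := by omega
    have hne : i.natAbs ≠ 0 := by omega
    have hc := count_toDigits i.natAbs
    rw [if_neg hne, hcast] at hc
    simp [h0, h1]
    exact_mod_cast hc
  · simp only [if_neg hneg]
    have hcast : (i.toNat : Int) = i := by omega
    by_cases h0 : i = 0
    · subst h0; simp [count_toDigits]
    · have hc := count_toDigits i.toNat
      rw [if_neg (show i.toNat ≠ 0 by omega), hcast] at hc
      rw [hc]
      simp [h0, show 0 < i by omega]

-- A is the sum of per-number zero counts over the range
theorem getZeroCnt_eq_sum (a b : Int) :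
    getZeroCnt a b = ((PySem.List.pyRange a (b + 1) 1).map cnt).sum := by
  unfold getZeroCnt
  have hfun : ∀ (zero i : Int),
      (PySem.Int.toStr i).toList.foldl (fun z j => if j = '0' then z + 1 else z) zero
        = zero + cnt i := by
    intro zero i
    rw [PySem.Int.toList_toStr]
    exact PySem.List.foldl_ite_add_one (fun j => j = '0') _ zero
  calc (PySem.List.pyRange a (b + 1) 1).foldl
        (fun zero i =>
          (PySem.Int.toStr i).toList.foldl (fun z j => if j = '0' then z + 1 else z) zero) 0
      = (PySem.List.pyRange a (b + 1) 1).foldl (fun zero i => zero + cnt i) 0 := by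
        apply PySem.List.foldl_congr_mem
        intro acc x _
        exact hfun acc x
    _ = ((PySem.List.pyRange a (b + 1) 1).map cnt).sum := by
        rw [PySem.List.foldl_add]; ring

theorem alt_empty (a b : Int) (h : b < a) : getZeroCnt_alt a b = 0 := by
  unfold getZeroCnt_alt
  have h1 : ¬ (a ≤ 0 ∧ 0 ≤ b) := by omega
  have h2 : ¬ (max a 1 ≤ b) := by
    rcases max_cases a 1 with ⟨he, _⟩ | ⟨he, _⟩ <;> omega
  have h3 : ¬ (max (-b) 1 ≤ -a) := by
    rcases max_cases (-b) 1 with ⟨he, _⟩ | ⟨he, _⟩ <;> omega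
  simp [h1, h2, h3]

theorem alt_step (a b : Int) (h : a ≤ b) :
    getZeroCnt_alt a b = getZeroCnt_alt a (b - 1) + cnt b := by
  unfold getZeroCnt_alt
  rw [cnt_eq]
  by_cases hb1 : 1 ≤ b
  · have hne0 : ¬ b = 0 := by omega
    have hpos : 0 < b := by omega
    have hlo : max a 1 ≤ b := by omega
    have hlo2 : max (-b) 1 = 1 := by omega
    have hlo2' : max (-(b-1)) 1 = 1 := by omega
    rw [hlo2, hlo2']
    simp only [if_neg hne0, if_pos hpos, if_pos hlo]
    by_cases hc : max a 1 ≤ b - 1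
    · rw [if_pos hc]
      have hstep := ZAlt_step b hb1
      by_cases hd : 1 ≤ -a
      · rw [if_pos hd, if_pos hd]
        split_ifs <;> omega
      · rw [if_neg hd, if_neg hd]
        split_ifs <;> omega
    · rw [if_neg hc]
      have hmax : max a 1 = b := by omega
      have hstep := ZAlt_step b hb1
      rw [hmax]
      by_cases hd : 1 ≤ -a
      · rw [if_pos hd, if_pos hd]
        split_ifs <;> omega
      · rw [if_neg hd, if_neg hd]
        split_ifs <;> omega
  · by_cases hb0 : b = 0
    · subst hb0
      have ha : a ≤ 0 := h
      have h1 : (a ≤ 0 ∧ (0:Int) ≤ 0) := ⟨ha, le_refl 0⟩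
      have h2 : ¬ (a ≤ 0 ∧ (0:Int) ≤ 0 - 1) := by omega
      have h3 : ¬ (max a 1 ≤ (0:Int)) := by
        have : (1:Int) ≤ max a 1 := le_max_right a 1
        omega
      have h4 : ¬ (max a 1 ≤ (0:Int) - 1) := by
        have : (1:Int) ≤ max a 1 := le_max_right a 1
        omega
      have h5 : max (-(0:Int)) 1 = 1 := by norm_num
      have h6 : max (-((0:Int) - 1)) 1 = 1 := by norm_num
      rw [h5, h6]
      simp only [if_pos h1, if_neg h2, if_neg h3, if_neg h4]
      by_cases hd : (1:Int) ≤ -a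
      · rw [if_pos hd, if_pos hd]; norm_num; ring
      · rw [if_neg hd, if_neg hd]; norm_num
    · have hbneg : b ≤ -1 := by omega
      have hne0 : ¬ b = 0 := hb0
      have hnpos : ¬ 0 < b := by omega
      simp only [if_neg hne0, if_neg hnpos]
      have h1 : ¬ (a ≤ 0 ∧ 0 ≤ b) := by omega
      have h2 : ¬ (a ≤ 0 ∧ 0 ≤ b - 1) := by omega
      have h3 : ¬ (max a 1 ≤ b) := by
        have : (1:Int) ≤ max a 1 := le_max_right a 1
        omega
      have h4 : ¬ (max a 1 ≤ b - 1) := by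
        have : (1:Int) ≤ max a 1 := le_max_right a 1
        omega
      have h5 : max (-b) 1 = -b := by omega
      have h6 : max (-(b - 1)) 1 = -b + 1 := by omega
      rw [h5, h6]
      simp only [if_neg h1, if_neg h2, if_neg h3, if_neg h4]
      have hstep := ZAlt_step (-b) (by omega)
      have hcond : -b ≤ -a := by omega
      rw [if_pos hcond]
      rw [show -b + 1 - 1 = -b by ring]
      by_cases hd : -b + 1 ≤ -a
      · rw [if_pos hd]
        omega
      · rw [if_neg hd]
        have haeqb : -a = -b := by omega
        rw [haeqb]
        omega

theorem sum_eq_alt : ∀ (k : Nat) (a b : Int), (b + 1 - a).toNat = k →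
    ((PySem.List.pyRange a (b + 1) 1).map cnt).sum = getZeroCnt_alt a b := by
  intro k
  induction k with
  | zero =>
    intro a b hk
    have h : b < a := by omega
    rw [PySem.List.pyRange_one_eq_nil (by omega), alt_empty a b h]
    simp
  | succ m ih =>
    intro a b hk
    have h : a ≤ b := by omega
    rw [PySem.List.pyRange_one_succ_right h]
    rw [List.map_append, List.sum_append]
    have hih := ih a (b - 1) (by omega)
    rw [show b - 1 + 1 = b by ring] at hih
    rw [hih, alt_step a b h]
    simp

-- ===== VERDICT (by name: the statement is the Claim_ definition above) =====
theorem getZeroCnt_spec : Claim_equal_getZeroCnt := by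
  intro a b _
  unfold Spec_getZeroCnt
  rw [getZeroCnt_eq_sum, sum_eq_alt (b + 1 - a).toNat a b rfl]
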